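-- pv_equiv track=rewrite | github.com/hermanwjacobsen/hfortix-fortios | packages/fortios/dev/generator/schema_management/schema_parser.py | _convert_plus_to_underscore
-- ===== SOURCE A (Python) =====
-- def _convert_plus_to_underscore(name: str) -> str:
--     """
--     Convert plus signs to _plus_ in identifiers.
--
--     Examples:
--         tacacs+ -> tacacs_plus
--         tacacs+accounting -> tacacs_plus_accounting
--         log.tacacs+accounting -> log.tacacs_plus_accounting
--
--     Args:
--         name: The name to convert
--
--     Returns:
--         Name with + replaced by _plus_ (with underscores on both sides if needed)
--     """
--     if '+' not in name:
--         return name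
--
--     # Replace + with _plus_, but handle edge cases
--     result = []
--     for i, char in enumerate(name):
--         if char == '+':
--             # Add underscore before plus if not already there and not at start
--             if i > 0 and name[i-1] not in ('_', '.', '/'):
--                 result.append('_')
--             result.append('plus')
--             # Add underscore after plus if not already there and not at end
--             if i < len(name) - 1 and name[i+1] not in ('_', '.', '/'):
--                 result.append('_')
--         else:
--             result.append(char)
--
--     return ''.join(result)
-- ===== SOURCE B (Python) =====
-- def _convert_plus_to_underscore(name: str) -> str:
--     """Split on '+' and rebuild, deciding each boundary's underscores from the
--     neighbouring segments instead of scanning char by char."""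
--     segs = name.split('+')
--     if len(segs) == 1:
--         return name
--
--     def glue(prev: str, rest: list, at_start: bool) -> str:
--         if not rest:
--             return ''
--         nxt = rest[0]
--         if prev:
--             left = '' if prev[-1] in ('_', '.', '/') else '_'
--         else:
--             left = '' if at_start else '_'
--         if nxt:
--             right = '' if nxt[0] in ('_', '.', '/') else '_'
--         else:
--             right = '' if len(rest) == 1 else '_'
--         return left + 'plus' + right + nxt + glue(nxt, rest[1:], False)
--
--     return segs[0] + glue(segs[0], segs[1:], True)
-- ===== Notes on version B (the rewrite author's own statement) =====
-- stated objective: alternative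
-- what changed: B splits the name at the plus signs once and rebuilds it by gluing the segments, deciding each boundary's underscores from the neighbouring segments, instead of A's char-by-char scan with index lookups at i-1 and i+1.
import Mathlib
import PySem

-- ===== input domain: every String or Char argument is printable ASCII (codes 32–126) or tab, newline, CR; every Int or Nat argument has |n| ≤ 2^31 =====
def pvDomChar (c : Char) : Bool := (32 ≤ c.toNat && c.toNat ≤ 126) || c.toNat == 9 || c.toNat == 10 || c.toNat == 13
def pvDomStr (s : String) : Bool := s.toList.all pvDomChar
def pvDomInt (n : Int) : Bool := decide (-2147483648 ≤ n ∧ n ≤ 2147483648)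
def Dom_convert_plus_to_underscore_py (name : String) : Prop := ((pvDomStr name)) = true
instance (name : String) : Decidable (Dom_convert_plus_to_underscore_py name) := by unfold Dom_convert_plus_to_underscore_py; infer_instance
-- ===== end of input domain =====

-- B replaces A's char-by-char scan (with index lookups at i-1/i+1) by splitting on '+'
-- and gluing the segments back, deciding each boundary's underscores from the
-- neighbouring segments; objective: alternative decomposition, same cost.

-- membership in the tuple ('_', '.', '/') used by both Pythons
def pvIsSep (c : Char) : Bool := c = '_' || c = '.' || c = '/'

-- ===== PORT A =====
-- loop body of A's `for i, char in enumerate(name)` (result is the list of appended pieces)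
def pvStepA (s : List Char) (result : List (List Char)) (ic : Int × Char) : List (List Char) :=
  if ic.2 = '+' then
    -- underscore before plus if not at start and name[i-1] not in ('_','.','/')
    let r1 := if 0 < ic.1 && !pvIsSep (PySem.List.pyGetD s (ic.1 - 1) ' ') then result ++ [['_']] else result
    let r2 := r1 ++ [['p','l','u','s']]
    -- underscore after plus if not at end and name[i+1] not in ('_','.','/')
    if ic.1 < PySem.Chars.len s - 1 && !pvIsSep (PySem.List.pyGetD s (ic.1 + 1) ' ') then r2 ++ [['_']] else r2
  else result ++ [[ic.2]]

def convert_plus_to_underscore_py (name : String) : String :=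
  if !PySem.Str.isIn "+" name then name
  else
    String.ofList (PySem.Chars.join []
      ((PySem.List.enumerate name.toList 0).foldl (pvStepA name.toList) []))

-- ===== PORT B =====
-- Source B's `glue(prev, rest, at_start)` recursion over the remaining segments
def pvGlueB (prev : List Char) (rest : List (List Char)) (atStart : Bool) : List Char :=
  match rest with
  | [] => []
  | nxt :: more =>
    let left := if prev ≠ [] then (if pvIsSep prev.getLast! then [] else ['_'])
                else (if atStart then [] else ['_'])
    let right := if nxt ≠ [] then (if pvIsSep nxt.head! then [] else ['_'])
                 else (if more = [] then [] else ['_'])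
    left ++ ['p','l','u','s'] ++ right ++ nxt ++ pvGlueB nxt more false

def convert_plus_to_underscore_py_alt (name : String) : String :=
  let segs := PySem.Chars.splitOn name.toList ['+']
  if segs.length = 1 then name
  else String.ofList (segs.head! ++ pvGlueB segs.head! segs.tail true)

-- ===== PRECONDITION & SPEC =====
def Spec_convert_plus_to_underscore_py (name : String) (out : String) : Prop := out = convert_plus_to_underscore_py_alt name
instance (name : String) (out : String) : Decidable (Spec_convert_plus_to_underscore_py name out) := by unfold Spec_convert_plus_to_underscore_py; infer_instance

-- ===== CLAIM (what is proved, stated in full; the proofs are below) =====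
def Claim_equal_convert_plus_to_underscore_py : Prop := ∀ (name : String), Dom_convert_plus_to_underscore_py name → Spec_convert_plus_to_underscore_py name (convert_plus_to_underscore_py name)

-- ===== LEMMAS AND PROOFS =====

-- proof-side mirror of str.split('+')
def pvSplit : List Char → List (List Char)
  | [] => [[]]
  | c :: r =>
    if c = '+' then [] :: pvSplit r
    else match pvSplit r with
         | [] => [[c]]   -- unreachable: pvSplit never returns []
         | h :: t => (c :: h) :: t

-- proof-side mirror of A's loop: output chars given the char preceding the suffix (if any)
def pvFA : Option Char → List Char → List Char
  | _, [] => []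
  | p, c :: r =>
    if c = '+' then
      (match p with | none => [] | some d => if pvIsSep d then [] else ['_'])
      ++ ['p','l','u','s']
      ++ (match r.head? with | none => [] | some d => if pvIsSep d then [] else ['_'])
      ++ pvFA (some '+') r
    else c :: pvFA (some c) r

-- the char just before a boundary: last char of the segment, else the given fallback
def pvLastOpt (seg : List Char) (p : Option Char) : Option Char := seg.getLast?.or p

-- pvGlueB with the left context reduced to the single preceding char
def pvGlueC : Option Char → List (List Char) → List Char
  | _, [] => []
  | pc, nxt :: more =>
    (match pc with | none => [] | some d => if pvIsSep d then [] else ['_'])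
    ++ ['p','l','u','s']
    ++ (match (if nxt ≠ [] then some nxt.head! else if more ≠ [] then some '+' else none) with
        | none => [] | some d => if pvIsSep d then [] else ['_'])
    ++ nxt ++ pvGlueC (pvLastOpt nxt (some '+')) more

-- the char before position k (none at k = 0)
def pvPrev (s : List Char) (k : Nat) : Option Char := if k = 0 then none else s[k-1]?

lemma pvJoin_eq_flatten (l : List (List Char)) : PySem.Chars.join [] l = l.flatten := by
  induction l with
  | nil => rfl
  | cons a t ih =>
    cases t with
    | nil => simp [PySem.Chars.join, List.intercalate]
    | cons b u =>
      simp only [PySem.Chars.join, List.intercalate, List.intersperse] at *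
      simp_all

lemma pvSplit_ne_nil (s : List Char) : pvSplit s ≠ [] := by
  cases s with
  | nil => simp [pvSplit]
  | cons c r =>
    simp only [pvSplit]
    split
    · simp
    · split <;> simp

lemma pvSplit_length_eq_one (s : List Char) : (pvSplit s).length = 1 ↔ '+' ∉ s := by
  induction s with
  | nil => simp [pvSplit]
  | cons c r ih =>
    by_cases hc : c = '+'
    · subst hc
      simp [pvSplit, List.length_eq_zero_iff]
      exact pvSplit_ne_nil r
    · rw [show pvSplit (c :: r) = (match pvSplit r with
          | [] => [[c]] | h :: t => (c :: h) :: t) from by simp [pvSplit, hc]]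
      cases hs : pvSplit r with
      | nil => exact absurd hs (pvSplit_ne_nil r)
      | cons h t =>
        simp only [List.length_cons, List.mem_cons]
        rw [hs] at ih
        simp only [List.length_cons] at ih
        rw [ih]
        simp [Ne.symm hc]

lemma pvGo_eq (fuel : Nat) : ∀ (l cur : List Char) (acc : List (List Char)), l.length < fuel →
    PySem.Chars.splitOn.go ['+'] fuel l cur acc =
      acc.reverse ++ ((cur.reverse ++ (pvSplit l).head!) :: (pvSplit l).tail) := by
  induction fuel with
  | zero => intro l cur acc h; omega
  | succ f ih =>
    intro l cur acc hlen
    cases l with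
    | nil =>
      unfold PySem.Chars.splitOn.go
      simp [pvSplit]
    | cons c rest =>
      have hf : rest.length < f := by simp at hlen; omega
      by_cases hc : c = '+'
      · subst hc
        have hstep : PySem.Chars.splitOn.go ['+'] (f + 1) ('+' :: rest) cur acc =
            PySem.Chars.splitOn.go ['+'] f rest [] (cur.reverse :: acc) := by
          conv_lhs => unfold PySem.Chars.splitOn.go
          simp [List.isPrefixOf]
        rw [hstep, ih _ _ _ hf]
        cases hs : pvSplit rest with
        | nil => exact absurd hs (pvSplit_ne_nil rest)
        | cons h t => simp [pvSplit, hs]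
      · have hstep : PySem.Chars.splitOn.go ['+'] (f + 1) (c :: rest) cur acc =
            PySem.Chars.splitOn.go ['+'] f rest (c :: cur) acc := by
          conv_lhs => unfold PySem.Chars.splitOn.go
          simp [List.isPrefixOf, Ne.symm hc]
        rw [hstep, ih _ _ _ hf]
        cases hs : pvSplit rest with
        | nil => exact absurd hs (pvSplit_ne_nil rest)
        | cons h t => simp [pvSplit, hs, hc]

lemma pvSplitOn_eq (s : List Char) : PySem.Chars.splitOn s ['+'] = pvSplit s := by
  unfold PySem.Chars.splitOn
  rw [pvGo_eq (s.length + 1) s [] [] (by omega)]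
  cases hs : pvSplit s with
  | nil => exact absurd hs (pvSplit_ne_nil s)
  | cons h t => simp

lemma pvGlueB_eq_glueC (rest : List (List Char)) : ∀ (prev : List Char) (atStart : Bool),
    pvGlueB prev rest atStart = pvGlueC (pvLastOpt prev (if atStart then none else some '+')) rest := by
  induction rest with
  | nil => intro prev atStart; rfl
  | cons nxt more ih =>
    intro prev atStart
    have hnxt := ih nxt false
    simp only [if_neg (by simp : ¬ (false : Bool) = true)] at hnxt
    simp only [pvGlueB, pvGlueC, hnxt]
    cases prev with
    | nil => cases atStart <;> cases nxt <;> cases more <;> simp [pvLastOpt, pvIsSep]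
    | cons p ps =>
      have hl : (p :: ps).getLast? = some ((p :: ps).getLast (by simp)) :=
        List.getLast?_eq_some_getLast _
      cases atStart <;> cases nxt <;> cases more <;> simp [pvLastOpt, pvIsSep, hl]

lemma pvLoopA (s : List Char) : ∀ (t : List Char) (k : Nat) (acc : List (List Char)),
    t = s.drop k →
    PySem.Chars.join [] (List.foldl (pvStepA s) acc (PySem.List.enumerate t (k : Int))) =
      PySem.Chars.join [] acc ++ pvFA (pvPrev s k) t := by
  intro t
  induction t with
  | nil => intro k acc _; simp [PySem.List.enumerate, pvFA]
  | cons c r ih =>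
    intro k acc hdrop
    have hk : k < s.length := by
      have := congrArg List.length hdrop
      simp [List.length_drop] at this
      omega
    have hgetk : s[k]? = some c := by
      have h0 : (List.drop k s)[0]? = s[k+0]? := List.getElem?_drop
      rw [← hdrop] at h0
      simpa using h0.symm
    have hr : r = s.drop (k + 1) := by
      rw [← List.tail_drop, ← hdrop]
      rfl
    have hprev1 : pvPrev s (k + 1) = some c := by
      simp [pvPrev, hgetk]
    rw [PySem.List.enumerate_cons, List.foldl_cons]
    have hcast : ((k : Int) + 1) = ((k + 1 : Nat) : Int) := by omega
    rw [hcast, ih (k + 1) _ hr, hprev1]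
    by_cases hc : c = '+'
    · subst hc
      have hL : (if 0 < k ∧ pvIsSep (PySem.List.pyGetD s ((k : Int) - 1) ' ') = false then (['_'] : List Char) else []) =
          (match pvPrev s k with | none => [] | some d => if pvIsSep d then [] else ['_']) := by
        cases k with
        | zero => simp [pvPrev]
        | succ k' =>
          have hik : ((k' + 1 : Nat) : Int) - 1 = ((k' : Nat) : Int) := by omega
          rw [hik, PySem.List.pyGetD_natCast]
          have hk' : k' < s.length := by omega
          have hgd : s.getD k' ' ' = s[k'] := by
            simp [List.getD_eq_getElem?_getD, List.getElem?_eq_getElem hk']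
          rw [hgd]
          have hpv : pvPrev s (k' + 1) = some s[k'] := by
            simp [pvPrev, List.getElem?_eq_getElem hk']
          rw [hpv]
          by_cases hsep : pvIsSep s[k'] <;> simp [hsep]
      have hR : (if (k : Int) < (s.length : Int) - 1 ∧ pvIsSep (PySem.List.pyGetD s ((k : Int) + 1) ' ') = false then (['_'] : List Char) else []) =
          (match r.head? with | none => [] | some d => if pvIsSep d then [] else ['_']) := by
        cases hrr : r with
        | nil =>
          have hlen : s.length = k + 1 := by
            have := congrArg List.length hr
            rw [hrr] at this
            simp [List.length_drop] at this
            omega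
          have hnl : ¬ ((k : Int) < (s.length : Int) - 1) := by
            rw [hlen]; push_cast; omega
          simp [hnl]
        | cons d r2 =>
          have hk1 : k + 1 < s.length := by
            have := congrArg List.length hr
            rw [hrr] at this
            simp [List.length_drop] at this
            omega
          have hgd : s[k+1]? = some d := by
            have h0 : (List.drop (k+1) s)[0]? = s[(k+1)+0]? := List.getElem?_drop
            rw [← hr, hrr] at h0
            simpa using h0.symm
          have hlt : ((k : Int) < (s.length : Int) - 1) := by omega
          rw [hcast, PySem.List.pyGetD_natCast]
          have hgd' : s.getD (k+1) ' ' = d := by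
            simp [List.getD_eq_getElem?_getD, hgd]
          rw [hgd']
          by_cases hsep : pvIsSep d <;> simp [hsep, hlt]
      rw [show pvFA (pvPrev s k) ('+' :: r) =
            (match pvPrev s k with | none => [] | some d => if pvIsSep d then [] else ['_'])
            ++ ['p','l','u','s']
            ++ (match r.head? with | none => [] | some d => if pvIsSep d then [] else ['_'])
            ++ pvFA (some '+') r from by simp [pvFA]]
      rw [← hL, ← hR]
      by_cases h1 : (0 < k ∧ pvIsSep (PySem.List.pyGetD s ((k : Int) - 1) ' ') = false) <;>
        by_cases h2 : ((k : Int) < (s.length : Int) - 1 ∧ pvIsSep (PySem.List.pyGetD s ((k : Int) + 1) ' ') = false) <;>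
        simp [pvStepA, pvJoin_eq_flatten, h1, h2]
    · rw [show pvFA (pvPrev s k) (c :: r) = c :: pvFA (some c) r from by simp [pvFA, hc]]
      simp [pvStepA, pvJoin_eq_flatten, hc]

lemma pvFA_eq_glueC (s : List Char) : ∀ (p : Option Char),
    pvFA p s = (pvSplit s).head! ++ pvGlueC (pvLastOpt (pvSplit s).head! p) (pvSplit s).tail := by
  induction s with
  | nil => intro p; simp [pvFA, pvSplit, pvLastOpt, pvGlueC]
  | cons c r ih =>
    intro p
    obtain ⟨h, t, hs⟩ : ∃ h t, pvSplit r = h :: t := by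
      cases hs : pvSplit r with
      | nil => exact absurd hs (pvSplit_ne_nil r)
      | cons h t => exact ⟨h, t, rfl⟩
    by_cases hc : c = '+'
    · subst hc
      have hsplit : pvSplit ('+' :: r) = [] :: pvSplit r := by simp [pvSplit]
      rw [hsplit]
      simp only [List.head!, List.tail, hs]
      rw [show pvFA p ('+' :: r) =
            (match p with | none => [] | some d => if pvIsSep d then [] else ['_'])
            ++ ['p','l','u','s']
            ++ (match r.head? with | none => [] | some d => if pvIsSep d then [] else ['_'])
            ++ pvFA (some '+') r from by simp [pvFA]]
      rw [ih (some '+'), hs]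
      simp only [List.head!, List.tail]
      have hhead : (match r.head? with | none => ([] : List Char) | some d => if pvIsSep d then [] else ['_']) =
          (match (if h ≠ [] then some h.head! else if t ≠ [] then some '+' else none) with
           | none => ([] : List Char) | some d => if pvIsSep d then [] else ['_']) := by
        cases r with
        | nil =>
          have : pvSplit ([] : List Char) = [[]] := rfl
          rw [this] at hs
          obtain ⟨rfl, rfl⟩ : h = [] ∧ t = [] := by
            cases hs; exact ⟨rfl, rfl⟩
          rfl
        | cons d r2 =>
          by_cases hd : d = '+'
          · subst hd
            have : pvSplit ('+' :: r2) = [] :: pvSplit r2 := by simp [pvSplit]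
            rw [this] at hs
            obtain ⟨rfl, ht⟩ : h = [] ∧ t = pvSplit r2 := by cases hs; exact ⟨rfl, rfl⟩
            have : t ≠ [] := ht ▸ pvSplit_ne_nil r2
            simp [this, pvIsSep]
          · obtain ⟨h2, t2, hs2⟩ : ∃ h2 t2, pvSplit r2 = h2 :: t2 := by
              cases hs2 : pvSplit r2 with
              | nil => exact absurd hs2 (pvSplit_ne_nil r2)
              | cons h2 t2 => exact ⟨h2, t2, rfl⟩
            have : pvSplit (d :: r2) = (d :: h2) :: t2 := by simp [pvSplit, hd, hs2]
            rw [this] at hs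
            obtain ⟨hh, ht⟩ : h = d :: h2 ∧ t = t2 := by cases hs; exact ⟨rfl, rfl⟩
            subst hh
            simp
      rw [hhead]
      simp [pvGlueC, pvLastOpt]
    · have hsplit : pvSplit (c :: r) = (c :: h) :: t := by simp [pvSplit, hc, hs]
      rw [hsplit]
      simp only [List.head!, List.tail]
      rw [show pvFA p (c :: r) = c :: pvFA (some c) r from by simp [pvFA, hc]]
      rw [ih (some c), hs]
      simp only [List.head!, List.tail, List.cons_append]
      have : pvLastOpt (c :: h) p = pvLastOpt h (some c) := by
        cases h with
        | nil => simp [pvLastOpt]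
        | cons x xs =>
          simp only [pvLastOpt]
          rw [show (c :: x :: xs).getLast? = (x :: xs).getLast? from by
            simp [List.getLast?_cons]]
          rw [List.getLast?_eq_some_getLast (l := x :: xs) (by simp)]
          simp
      rw [this]

lemma pvIsIn_iff (s : List Char) : PySem.Chars.isIn ['+'] s = true ↔ '+' ∈ s := by
  rw [PySem.Chars.isIn_iff_infix]
  constructor
  · rintro ⟨p, q, rfl⟩; simp
  · intro hm; obtain ⟨p, q, rfl⟩ := List.append_of_mem hm; exact ⟨p, q, by simp⟩

-- ===== VERDICT (by name: the statement is the Claim_ definition above) =====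
theorem convert_plus_to_underscore_py_spec : Claim_equal_convert_plus_to_underscore_py := by
  intro name _
  unfold Spec_convert_plus_to_underscore_py
  unfold convert_plus_to_underscore_py convert_plus_to_underscore_py_alt
  rw [pvSplitOn_eq]
  by_cases hmem : '+' ∈ name.toList
  · have h1 : (!PySem.Str.isIn "+" name) = false := by
      simp [(pvIsIn_iff name.toList).mpr hmem]
    have h2 : ¬ (pvSplit name.toList).length = 1 := by
      simp [pvSplit_length_eq_one, hmem]
    rw [h1, if_neg h2]
    simp only [Bool.false_eq_true, if_false]
    have hloop := pvLoopA name.toList name.toList 0 [] (by simp)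
    push_cast at hloop
    rw [hloop]
    obtain ⟨h, t, hst⟩ : ∃ h t, pvSplit name.toList = h :: t := by
      cases hs : pvSplit name.toList with
      | nil => exact absurd hs (pvSplit_ne_nil _)
      | cons h t => exact ⟨h, t, rfl⟩
    rw [pvFA_eq_glueC name.toList (pvPrev name.toList 0)]
    rw [pvGlueB_eq_glueC]
    simp [hst, pvPrev]
  · have h1 : (!PySem.Str.isIn "+" name) = true := by
      simp only [Bool.not_eq_true', PySem.Str.isIn]
      rw [← Bool.not_eq_true]
      intro hb
      exact hmem (by simpa using (pvIsIn_iff name.toList).mp (by simpa using hb))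
    have h2 : (pvSplit name.toList).length = 1 := (pvSplit_length_eq_one _).mpr hmem
    rw [h1, if_pos h2]
    simp
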